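-- pv_equiv track=rewrite | github.com/SakenW/TH-Suite | apps/mc_l10n/backend/backup_20250906_123924/fixed_scanner.py | _clean_toml_content
-- ===== SOURCE A (Python) =====
-- def _clean_toml_content(text: str) -> str:
--     """清理TOML内容，移除注释和处理变量"""
--     lines = []
--     for line in text.split('\n'):
--         # 移除行内注释
--         if '#' in line:
--             # 但要保留引号内的#
--             in_quotes = False
--             cleaned_line = []
--             for i, char in enumerate(line):
--                 if char in '"\'':
--                     in_quotes = not in_quotes
--                 if char == '#' and not in_quotes:
--                     break
--                 cleaned_line.append(char)
--             line = ''.join(cleaned_line)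
--
--         # 处理变量替换
--         if '${file.jarVersion}' in line:
--             line = line.replace('${file.jarVersion}', 'unknown')
--
--         lines.append(line.strip())
--
--     return '\n'.join(lines)
-- ===== SOURCE B (Python) =====
-- def _clean_toml_content(text: str) -> str:
--     lines = []
--     for line in text.split('\n'):
--         if '#' in line:
--             # split on '#' and rebuild: a '#' is kept only while the number of
--             # quote characters accumulated so far is odd (i.e. it sits "inside quotes")
--             parts = line.split('#')
--             kept = parts[0]
--             quotes = kept.count('"') + kept.count("'")
--             for part in parts[1:]:
--                 if quotes % 2 == 1:
--                     kept += '#' + part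
--                     quotes += part.count('"') + part.count("'")
--                 else:
--                     break
--             line = kept
--         if '${file.jarVersion}' in line:
--             line = line.replace('${file.jarVersion}', 'unknown')
--         lines.append(line.strip())
--     return '\n'.join(lines)
-- ===== Notes on version B (the rewrite author's own statement) =====
-- stated objective: alternative
-- what changed: The per-character break-scan with an in_quotes flag is replaced by splitting the line on '#' and rejoining segments while a running count of quote characters stays odd; the per-line loop, variable replace and strip/join are kept.
import Mathlib
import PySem

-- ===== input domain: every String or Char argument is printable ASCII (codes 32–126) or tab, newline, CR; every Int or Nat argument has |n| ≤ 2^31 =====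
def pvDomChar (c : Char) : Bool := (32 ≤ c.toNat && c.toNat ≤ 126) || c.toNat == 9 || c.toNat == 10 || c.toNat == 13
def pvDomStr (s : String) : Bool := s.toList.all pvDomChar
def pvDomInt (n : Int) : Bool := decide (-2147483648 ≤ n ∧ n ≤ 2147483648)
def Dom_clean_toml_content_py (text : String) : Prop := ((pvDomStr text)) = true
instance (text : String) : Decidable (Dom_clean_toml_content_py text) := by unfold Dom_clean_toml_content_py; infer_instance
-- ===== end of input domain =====

-- B replaces A's per-character break-scan (in_quotes flag) by split-on-'#' and rejoin
-- while the running quote count is odd; same per-line loop, replace and strip/join.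

def pvPat : List Char := "${file.jarVersion}".toList
def pvUnknown : List Char := "unknown".toList

-- ===== PORT A =====
-- the inner 'for i, char in enumerate(line)' loop with its break
def pvScanA : List Char → Bool → List Char
  | [], _ => []
  | c :: rest, inq =>
    let inq := if c = '"' || c = '\'' then !inq else inq
    if c = '#' && !inq then []
    else c :: pvScanA rest inq

def pvLineA (l : List Char) : List Char :=
  let l := if PySem.Chars.isIn ['#'] l then pvScanA l false else l
  let l := if PySem.Chars.isIn pvPat l then PySem.Chars.replace l pvPat pvUnknown else l
  PySem.Chars.strip l

def clean_toml_content_py (text : String) : String :=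
  String.ofList (PySem.Chars.join ['\n'] ((PySem.Chars.splitOn text.toList ['\n']).map pvLineA))

-- ===== PORT B =====
-- quotes counted with str.count on each segment
def pvQc (p : List Char) : Nat := PySem.Chars.count p ['"'] + PySem.Chars.count p ['\'']

-- the 'for part in parts[1:]' loop with its break, accumulating kept/quotes
def pvGoB : List (List Char) → List Char → Nat → List Char
  | [], kept, _ => kept
  | p :: ps, kept, q =>
    if q % 2 = 1 then pvGoB ps (kept ++ '#' :: p) (q + pvQc p) else kept

def pvStripB (l : List Char) : List Char :=
  match PySem.Chars.splitOn l ['#'] with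
  | [] => []      -- unreachable: split always yields at least one piece
  | p :: ps => pvGoB ps p (pvQc p)

def pvLineB (l : List Char) : List Char :=
  let l := if PySem.Chars.isIn ['#'] l then pvStripB l else l
  let l := if PySem.Chars.isIn pvPat l then PySem.Chars.replace l pvPat pvUnknown else l
  PySem.Chars.strip l

def clean_toml_content_py_alt (text : String) : String :=
  String.ofList (PySem.Chars.join ['\n'] ((PySem.Chars.splitOn text.toList ['\n']).map pvLineB))

-- ===== PRECONDITION & SPEC =====
def Spec_clean_toml_content_py (text : String) (out : String) : Prop := out = clean_toml_content_py_alt text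
instance (text : String) (out : String) : Decidable (Spec_clean_toml_content_py text out) := by unfold Spec_clean_toml_content_py; infer_instance

-- ===== CLAIM (what is proved, stated in full; the proofs are below) =====
def Claim_equal_clean_toml_content_py : Prop := ∀ (text : String), Dom_clean_toml_content_py text → Spec_clean_toml_content_py text (clean_toml_content_py text)

-- ===== LEMMAS AND PROOFS =====

-- structural characterisation of splitOn on the single-char separator '#'
def pvSplitH : List Char → List (List Char)
  | [] => [[]]
  | c :: rest => if c = '#' then [] :: pvSplitH rest else (pvSplitH rest).modifyHead (c :: ·)

theorem pvSplitH_ne_nil (l : List Char) : pvSplitH l ≠ [] := by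
  cases l with
  | nil => simp [pvSplitH]
  | cons c rest =>
    simp only [pvSplitH]
    split_ifs
    · simp
    · cases h : pvSplitH rest with
      | nil => exact absurd h (pvSplitH_ne_nil rest)
      | cons p ps => simp

theorem pvSplit_go (fuel : Nat) (l cur : List Char) (acc : List (List Char))
    (h : l.length < fuel) :
    PySem.Chars.splitOn.go ['#'] fuel l cur acc
      = acc.reverse ++ (pvSplitH l).modifyHead (cur.reverse ++ ·) := by
  induction fuel generalizing l cur acc with
  | zero => omega
  | succ fuel ih =>
    cases l with
    | nil => simp [PySem.Chars.splitOn.go, pvSplitH]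
    | cons c rest =>
      by_cases hc : c = '#'
      · subst hc
        have hp : List.isPrefixOf ['#'] ('#' :: rest) = true := by
          simp [List.isPrefixOf]
        rw [PySem.Chars.splitOn.go]
        simp only [hp, if_true, List.length_cons, List.drop_succ_cons, List.length_nil, List.drop_zero]
        rw [ih rest [] _ (by simp only [List.length_cons] at h; omega)]
        simp only [pvSplitH, if_true]
        cases hr : pvSplitH rest with
        | nil => exact absurd hr (pvSplitH_ne_nil rest)
        | cons p ps => simp
      · have hp : List.isPrefixOf ['#'] (c :: rest) = false := by
          simp [List.isPrefixOf]
          intro hh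
          exact absurd hh.symm hc
        rw [PySem.Chars.splitOn.go]
        simp only [hp, Bool.false_eq_true, if_false]
        rw [ih rest (c :: cur) acc (by simp only [List.length_cons] at h; omega)]
        simp only [pvSplitH, hc, if_false]
        cases hr : pvSplitH rest with
        | nil => exact absurd hr (pvSplitH_ne_nil rest)
        | cons p ps => simp

theorem pvSplitOn_eq (l : List Char) :
    PySem.Chars.splitOn l ['#'] = pvSplitH l := by
  rw [PySem.Chars.splitOn, pvSplit_go (l.length + 1) l [] [] (by omega)]
  cases h : pvSplitH l with
  | nil => exact absurd h (pvSplitH_ne_nil l)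
  | cons p ps => simp

-- str.count with a single-character needle is List.count
theorem pvCount_go_single (c : Char) (fuel : Nat) (l : List Char) (acc : Nat)
    (h : l.length ≤ fuel) :
    PySem.Chars.count.go [c] fuel l acc = acc + l.count c := by
  induction fuel generalizing l acc with
  | zero =>
    cases l with
    | nil => simp [PySem.Chars.count.go]
    | cons x t => simp at h
  | succ fuel ih =>
    cases l with
    | nil => simp [PySem.Chars.count.go]
    | cons x t =>
      by_cases hx : c = x
      · subst hx
        have hp : List.isPrefixOf [c] (c :: t) = true := by simp [List.isPrefixOf]
        rw [PySem.Chars.count.go]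
        simp only [hp, if_true, List.length_cons, List.drop_succ_cons, List.length_nil, List.drop_zero]
        rw [ih t (acc + 1) (by simp only [List.length_cons] at h; omega)]
        simp
        omega
      · have hp : List.isPrefixOf [c] (x :: t) = false := by
          simp [List.isPrefixOf]
          intro hh
          exact absurd hh hx
        rw [PySem.Chars.count.go]
        simp only [hp, Bool.false_eq_true, if_false]
        rw [ih t acc (by simp only [List.length_cons] at h; omega)]
        simp [List.count_cons]
        intro hh
        exact absurd hh.symm hx

theorem pvCount_single (c : Char) (l : List Char) :
    PySem.Chars.count l [c] = l.count c := by
  rw [PySem.Chars.count]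
  simp [pvCount_go_single c l.length l 0 (le_refl _)]

theorem pvQc_eq (p : List Char) : pvQc p = p.count '"' + p.count '\'' := by
  simp [pvQc, pvCount_single]

theorem pvQc_cons (c : Char) (p : List Char) :
    pvQc (c :: p) = (if c = '"' || c = '\'' then 1 else 0) + pvQc p := by
  simp only [pvQc_eq, List.count_cons]
  by_cases h1 : c = '"' <;> by_cases h2 : c = '\'' <;>
    simp [h1, h2] <;> omega

-- kept is accumulated on the left: pull it out
theorem pvGoB_append (ps : List (List Char)) (a k : List Char) (q : Nat) :
    pvGoB ps (a ++ k) q = a ++ pvGoB ps k q := by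
  induction ps generalizing a k q with
  | nil => simp [pvGoB]
  | cons p rest ih =>
    simp only [pvGoB]
    split_ifs
    · rw [List.append_assoc, ih]
    · rfl

-- the heart: A's break-scan equals B's rebuild from the '#'-split, for any
-- starting quote count n (A's flag is the parity of n)
theorem pvMain (l : List Char) (n : Nat) :
    (match pvSplitH l with
      | [] => []
      | p :: ps => pvGoB ps p (n + pvQc p)) = pvScanA l (decide (n % 2 = 1)) := by
  induction l generalizing n with
  | nil => simp [pvSplitH, pvGoB, pvScanA]
  | cons c rest ih =>
    by_cases hc : c = '#'
    · subst hc
      simp only [pvSplitH, if_true]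
      cases hr : pvSplitH rest with
      | nil => exact absurd hr (pvSplitH_ne_nil rest)
      | cons p ps =>
        simp only [pvQc_eq, List.count_nil, Nat.add_zero]
        by_cases hodd : n % 2 = 1
        · simp only [pvGoB, hodd, if_true, List.nil_append]
          have := pvGoB_append ps ['#'] p (n + pvQc p)
          simp only [List.singleton_append] at this
          rw [this]
          have hm := ih n
          rw [hr] at hm
          simp only at hm
          simp [pvScanA, hm, hodd]
        · simp only [pvGoB, hodd, if_false]
          simp [pvScanA]
    · have hq : pvSplitH (c :: rest) = (pvSplitH rest).modifyHead (c :: ·) := by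
        simp [pvSplitH, hc]
      cases hr : pvSplitH rest with
      | nil => exact absurd hr (pvSplitH_ne_nil rest)
      | cons p ps =>
        rw [hq, hr]
        simp only [List.modifyHead_cons]
        by_cases hquote : c = '"' || c = '\''
        · have : pvGoB ps (c :: p) (n + pvQc (c :: p)) = c :: pvGoB ps p (n + pvQc (c :: p)) := by
            have := pvGoB_append ps [c] p (n + pvQc (c :: p))
            simpa using this
          rw [this, pvQc_cons, if_pos hquote]
          have hm := ih (n + 1)
          rw [hr] at hm
          simp only at hm
          have harr : n + (1 + pvQc p) = (n + 1) + pvQc p := by omega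
          rw [harr, hm]
          simp only [pvScanA, hquote, hc, if_true]
          have hpar : (decide ((n + 1) % 2 = 1)) = !(decide (n % 2 = 1)) := by
            by_cases h : n % 2 = 1 <;> simp [h] <;> omega
          simp [hpar]
        · have : pvGoB ps (c :: p) (n + pvQc (c :: p)) = c :: pvGoB ps p (n + pvQc (c :: p)) := by
            have := pvGoB_append ps [c] p (n + pvQc (c :: p))
            simpa using this
          rw [this, pvQc_cons, if_neg hquote, Nat.zero_add]
          have hm := ih n
          rw [hr] at hm
          simp only at hm
          rw [hm]
          simp [pvScanA, hquote, hc]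

theorem pvStripB_eq (l : List Char) : pvStripB l = pvScanA l false := by
  rw [pvStripB, pvSplitOn_eq]
  have := pvMain l 0
  simpa using this

theorem pvLine_eq (l : List Char) : pvLineA l = pvLineB l := by
  simp [pvLineA, pvLineB, pvStripB_eq]

-- ===== VERDICT (by name: the statement is the Claim_ definition above) =====
theorem clean_toml_content_py_spec : Claim_equal_clean_toml_content_py := by
  intro text _
  unfold Spec_clean_toml_content_py clean_toml_content_py clean_toml_content_py_alt
  rw [funext pvLine_eq]
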